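-- pv_equiv track=rewrite | github.com/jeremyfleche/Advent-of-Code | Advent of code 2015/24/24.py | taille_groupe
-- ===== SOURCE A (Python) =====
-- def taille_groupe(t):
-- 	poids = sum(t)//3
-- 	maxi = 0
-- 	while sum(t[:maxi]) <= poids:
-- 		maxi += 1
-- 	temp = list(reversed(t))
-- 	mini = 0
-- 	while sum(temp[:mini]) <= poids:
-- 		mini += 1
-- 	return mini,maxi
-- ===== SOURCE B (Python) =====
-- def taille_groupe(t):
--     poids = sum(t) // 3
--
--     def first_exceed(seq):
--         # running sum: first index i with sum(seq[:i]) > poids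
--         s = 0
--         for i, x in enumerate(seq):
--             if s > poids:
--                 return i
--             s += x
--         return len(seq)
--
--     return first_exceed(list(reversed(t))), first_exceed(t)
-- ===== Notes on version B (the rewrite author's own statement) =====
-- stated objective: alternative
-- what changed: A re-sums the whole prefix t[:m] on every iteration of each while loop; B instead makes one pass per direction with a running-sum accumulator, returning the first index whose prefix sum exceeds total//3.
import Mathlib
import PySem

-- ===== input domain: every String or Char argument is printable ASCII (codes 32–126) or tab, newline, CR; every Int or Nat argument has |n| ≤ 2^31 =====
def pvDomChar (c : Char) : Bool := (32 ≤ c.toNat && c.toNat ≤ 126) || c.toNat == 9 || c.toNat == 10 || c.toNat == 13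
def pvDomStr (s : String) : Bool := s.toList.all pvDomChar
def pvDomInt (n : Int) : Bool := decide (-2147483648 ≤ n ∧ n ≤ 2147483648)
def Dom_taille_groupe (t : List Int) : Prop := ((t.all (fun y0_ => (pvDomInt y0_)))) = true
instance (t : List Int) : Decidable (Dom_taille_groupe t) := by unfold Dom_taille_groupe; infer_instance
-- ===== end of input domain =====

-- B replaces A's "re-sum the whole prefix each iteration" while-loops by one
-- running-sum pass per direction (alternative structure); return value only, no side effects.

-- ===== PORT A =====
-- A's while loop: starting at m, keep incrementing m while sum(t[:m]) <= poids.
-- The fuel (t.length + 1) totalizes the loop: inside Pre_ the loop always stops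
-- at some m ≤ t.length, so the fuel is never exhausted there.
def pvWhileA (t : List Int) (poids : Int) : Nat → Nat → Nat
  | 0, m => m
  | k + 1, m => if (t.take m).sum ≤ poids then pvWhileA t poids k (m + 1) else m

def taille_groupe (t : List Int) : List Int :=
  let poids := PySem.Int.floordiv t.sum 3
  let maxi := pvWhileA t poids (t.length + 1) 0
  let temp := t.reverse
  let mini := pvWhileA temp poids (temp.length + 1) 0
  [(mini : Int), (maxi : Int)]

-- ===== PORT B =====
-- B's single pass: running sum s of the first i elements; return the first i with s > poids.
def pvFirstExceed (poids : Int) : List Int → Int → Nat → Int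
  | [], _, i => (i : Int)
  | x :: xs, s, i => if s > poids then (i : Int) else pvFirstExceed poids xs (s + x) (i + 1)

def taille_groupe_alt (t : List Int) : List Int :=
  let poids := PySem.Int.floordiv t.sum 3
  [pvFirstExceed poids t.reverse 0 0, pvFirstExceed poids t 0 0]

-- ===== PRECONDITION & SPEC =====
-- Pre_ excludes only the inputs on which A's while loops never stop (no prefix sum in that
-- direction ever exceeds sum(t)//3), i.e. exactly where the Python A diverges.
def Pre_taille_groupe (t : List Int) : Prop :=
  (∃ m < t.length + 1, (t.take m).sum > PySem.Int.floordiv t.sum 3) ∧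
  (∃ m < t.length + 1, (t.reverse.take m).sum > PySem.Int.floordiv t.sum 3)

instance (t : List Int) : Decidable (Pre_taille_groupe t) := by
  unfold Pre_taille_groupe; infer_instance

def pvWitness_taille_groupe : List Int := [1, 2, 3]

def Spec_taille_groupe (t : List Int) (out : List Int) : Prop := out = taille_groupe_alt t
instance (t : List Int) (out : List Int) : Decidable (Spec_taille_groupe t out) := by
  unfold Spec_taille_groupe; infer_instance

-- ===== CLAIM (what is proved, stated in full; the proofs are below) =====
def Claim_equal_taille_groupe : Prop :=
  ∀ (t : List Int), Dom_taille_groupe t → Pre_taille_groupe t →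
    Spec_taille_groupe t (taille_groupe t)

-- ===== LEMMAS AND PROOFS =====

-- Both loops compute the first index ≥ i whose prefix sum exceeds p; with fuel
-- t.length + 1 - i and a witness index in range they agree.
lemma pvWhileA_eq_firstExceed (t : List Int) (p : Int) :
    ∀ (k i : Nat), i + k = t.length + 1 →
      (∃ m, i ≤ m ∧ m < t.length + 1 ∧ (t.take m).sum > p) →
      ((pvWhileA t p k i : Nat) : Int) = pvFirstExceed p (t.drop i) ((t.take i).sum) i := by
  intro k
  induction k with
  | zero =>
    intro i h hex
    obtain ⟨m, him, hm, _⟩ := hex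
    omega
  | succ k ih =>
    intro i h hex
    obtain ⟨m, him, hmlen, hP⟩ := hex
    by_cases hle : (t.take i).sum ≤ p
    · -- the loops both step to i+1
      have hmi : i ≠ m := by
        intro e; rw [e] at hle; omega
      have hi : i < t.length := by
        rcases Nat.lt_or_ge i t.length with h' | h'
        · exact h'
        · exfalso
          have hil : i = t.length := by omega
          have hml : m = t.length := by omega
          rw [hil] at hle; rw [hml] at hP; omega
      have hdrop : t.drop i = t[i] :: t.drop (i + 1) := List.drop_eq_getElem_cons hi
      have hsum : (t.take (i + 1)).sum = (t.take i).sum + t[i] := by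
        rw [List.sum_take_succ]
      rw [hdrop]
      simp only [pvWhileA, pvFirstExceed, if_pos hle, if_neg (by omega : ¬ (t.take i).sum > p)]
      rw [← hsum]
      exact ih (i + 1) (by omega) ⟨m, by omega, hmlen, hP⟩
    · -- both return i
      simp only [pvWhileA, if_neg hle]
      rcases Nat.lt_or_ge i t.length with hi | hi
      · rw [List.drop_eq_getElem_cons hi]
        simp only [pvFirstExceed, if_pos (by omega : (t.take i).sum > p)]
      · have : t.drop i = [] := List.drop_eq_nil_of_le hi
        rw [this]
        simp [pvFirstExceed]

lemma loop_eq (t : List Int) (p : Int)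
    (h : ∃ m < t.length + 1, (t.take m).sum > p) :
    ((pvWhileA t p (t.length + 1) 0 : Nat) : Int) = pvFirstExceed p t 0 0 := by
  obtain ⟨m, hm, hP⟩ := h
  have := pvWhileA_eq_firstExceed t p (t.length + 1) 0 (by omega)
    ⟨m, Nat.zero_le _, hm, hP⟩
  simpa using this

-- ===== VERDICT (by name: the statement is the Claim_ definition above) =====
theorem taille_groupe_spec : Claim_equal_taille_groupe := by
  intro t _ hpre
  obtain ⟨h1, h2⟩ := hpre
  show taille_groupe t = taille_groupe_alt t
  unfold taille_groupe taille_groupe_alt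
  simp only [List.cons.injEq, and_true]
  constructor
  · have h2' : ∃ m < t.reverse.length + 1,
        (t.reverse.take m).sum > PySem.Int.floordiv t.sum 3 := by
      simpa using h2
    simpa using loop_eq t.reverse (PySem.Int.floordiv t.sum 3) h2'
  · exact loop_eq t (PySem.Int.floordiv t.sum 3) h1
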